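-- pv_equiv track=rewrite | github.com/Sumant-varanasi/spl-interpreter | spl_2.py | collect_expression
-- ===== SOURCE A (Python) =====
-- def collect_expression(tokens):
--     """
--     Gather all tokens that make up one complete expression.
--     Needed to save the body of f= or g= without evaluating it.
--     """
--     if not tokens:
--         return []
--
--     token = tokens.pop(0)
--     collected = [token]
--
--     try:
--         float(token)
--         return collected
--     except ValueError:
--         pass
--
--     if token in ('pi', 'exit', 'a', 'b', 'c', 'x'):
--         return collected
--
--     if token in ('+', '-', '*', '/', '^', '==', '<'):
--         collected += collect_expression(tokens)
--         collected += collect_expression(tokens)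
--         return collected
--
--     if token in ('sin', 'cos', 'exp', 'log', 'sqrt'):
--         collected += collect_expression(tokens)
--         return collected
--
--     if token in ('a=', 'b=', 'c='):
--         collected += collect_expression(tokens)
--         return collected
--
--     if token == 'if':
--         collected += collect_expression(tokens)
--         collected += collect_expression(tokens)
--         collected += collect_expression(tokens)
--         return collected
--
--     if token in ('f=', 'g='):
--         collected += collect_expression(tokens)
--         return collected
--
--     if token in ('f', 'g'):
--         collected += collect_expression(tokens)
--         return collected
--
--     if token == '{':
--         while tokens and tokens[0] != '}':
--             collected += collect_expression(tokens)
--         if tokens and tokens[0] == '}':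
--             collected.append(tokens.pop(0))
--         return collected
--
--     return collected
-- ===== SOURCE B (Python) =====
-- # Table-driven single pass: one shared output list is appended to while tokens
-- # are consumed, instead of A's per-call sublists merged with += at every level.
-- # Like A, this pops the consumed tokens from the caller's list in place.
--
-- ARITY = {'+': 2, '-': 2, '*': 2, '/': 2, '^': 2, '==': 2, '<': 2,
--          'sin': 1, 'cos': 1, 'exp': 1, 'log': 1, 'sqrt': 1,
--          'a=': 1, 'b=': 1, 'c=': 1, 'f=': 1, 'g=': 1, 'f': 1, 'g': 1,
--          'if': 3}
--
--
-- def collect_expression(tokens):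
--     out = []
--     _collect(tokens, out)
--     return out
--
--
-- def _collect(tokens, out):
--     if not tokens:
--         return
--     token = tokens.pop(0)
--     out.append(token)
--     if token == '{':
--         while tokens and tokens[0] != '}':
--             _collect(tokens, out)
--         if tokens:
--             out.append(tokens.pop(0))
--     else:
--         for _ in range(ARITY.get(token, 0)):
--             _collect(tokens, out)
-- ===== Notes on version B (the rewrite author's own statement) =====
-- stated objective: simpler
-- what changed: Replaced the float-probe plus nine-branch if/elif chain and the per-call sublists merged with += at every recursion level by a table-driven collector: an arity dictionary classifies each token and every token is appended once to one shared output list.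
import Mathlib
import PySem

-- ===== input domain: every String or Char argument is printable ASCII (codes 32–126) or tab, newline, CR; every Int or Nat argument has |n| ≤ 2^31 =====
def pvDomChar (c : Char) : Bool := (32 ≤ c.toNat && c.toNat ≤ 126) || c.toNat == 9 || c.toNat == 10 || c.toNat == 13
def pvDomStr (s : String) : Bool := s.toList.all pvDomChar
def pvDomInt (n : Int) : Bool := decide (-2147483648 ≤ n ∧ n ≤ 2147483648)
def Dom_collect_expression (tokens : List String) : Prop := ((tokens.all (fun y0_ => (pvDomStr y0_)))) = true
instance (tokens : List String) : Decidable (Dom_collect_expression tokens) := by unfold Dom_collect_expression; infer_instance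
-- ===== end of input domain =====

-- B replaces A's float-check + nine-branch if chain and per-call list concatenation by an
-- arity-table-driven collector that appends every token to one shared output list (objective:
-- simpler). Both A and B pop the consumed tokens from the caller's list in place; the
-- equivalence proved here is about the return value (the tokens popped are the same ones).


-- ===== PORT A =====
-- `try: float(token)` succeeds/fails — hand-ported float-literal test (exact on the printable-ASCII
-- domain up to underscore-grouped literals such as '1_0', where A's result is unaffected: a
-- float-parsable token and an unknown token both return [token]).
def pyDigits1 (l : List Char) : Bool := !l.isEmpty && l.all Char.isDigit

def pyMantOk (l : List Char) : Bool :=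
  let a := l.takeWhile (· ≠ '.')
  match l.dropWhile (· ≠ '.') with
  | [] => pyDigits1 a
  | _ :: frac => a.all Char.isDigit && frac.all Char.isDigit && (!a.isEmpty || !frac.isEmpty)

def pySignOpt (l : List Char) : List Char :=
  match l with
  | '+' :: r => r
  | '-' :: r => r
  | _ => l

def pyNumOk (l : List Char) : Bool :=
  let m := l.takeWhile (fun c => c ≠ 'e' && c ≠ 'E')
  match l.dropWhile (fun c => c ≠ 'e' && c ≠ 'E') with
  | [] => pyMantOk m
  | _ :: ex => pyMantOk m && pyDigits1 (pySignOpt ex)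

def pyFloatOk (s : String) : Bool :=
  let l := s.toList.dropWhile Char.isWhitespace
  let l := (l.reverse.dropWhile Char.isWhitespace).reverse
  let core := pySignOpt l
  let lc := PySem.Chars.lower core
  lc = "inf".toList || lc = "infinity".toList || lc = "nan".toList || pyNumOk core

def kwConst : List String := ["pi", "exit", "a", "b", "c", "x"]
def kwBin : List String := ["+", "-", "*", "/", "^", "==", "<"]
def kwFun1 : List String := ["sin", "cos", "exp", "log", "sqrt"]
def kwAsg : List String := ["a=", "b=", "c="]
def kwFdef : List String := ["f=", "g="]
def kwFap : List String := ["f", "g"]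

-- A's recursion, with the popped-from token list threaded explicitly: each call returns
-- (collected, remaining tokens). `fuel` only makes the `{`-loop structural; 2·len+2 is enough.
mutual
def collectA : Nat → List String → List String × List String
  | _, [] => ([], [])
  | 0, t => ([], t)
  | f + 1, token :: rest =>
    if pyFloatOk token then ([token], rest)
    else if kwConst.contains token then ([token], rest)
    else if kwBin.contains token then
      let p1 := collectA f rest
      let p2 := collectA f p1.2
      (token :: (p1.1 ++ p2.1), p2.2)
    else if kwFun1.contains token then
      let p1 := collectA f rest
      (token :: p1.1, p1.2)
    else if kwAsg.contains token then
      let p1 := collectA f rest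
      (token :: p1.1, p1.2)
    else if token = "if" then
      let p1 := collectA f rest
      let p2 := collectA f p1.2
      let p3 := collectA f p2.2
      (token :: (p1.1 ++ p2.1 ++ p3.1), p3.2)
    else if kwFdef.contains token then
      let p1 := collectA f rest
      (token :: p1.1, p1.2)
    else if kwFap.contains token then
      let p1 := collectA f rest
      (token :: p1.1, p1.2)
    else if token = "{" then
      let p := braceA f rest
      (token :: p.1, p.2)
    else ([token], rest)

-- the `while tokens and tokens[0] != '}'` loop plus the final `}` pop
def braceA : Nat → List String → List String × List String
  | _, [] => ([], [])
  | 0, t => ([], t)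
  | f + 1, h :: t =>
    if h = "}" then ([h], t)
    else
      let p := collectA f (h :: t)
      let q := braceA f p.2
      (p.1 ++ q.1, q.2)
end

def collect_expression (tokens : List String) : List String :=
  (collectA (2 * tokens.length + 2) tokens).1

-- ===== PORT B =====
def ARITY : PySem.Dict String Int :=
  PySem.Dict.ofList [("+", 2), ("-", 2), ("*", 2), ("/", 2), ("^", 2), ("==", 2), ("<", 2),
    ("sin", 1), ("cos", 1), ("exp", 1), ("log", 1), ("sqrt", 1),
    ("a=", 1), ("b=", 1), ("c=", 1), ("f=", 1), ("g=", 1), ("f", 1), ("g", 1),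
    ("if", 3)]

-- Source B's _collect with the shared `out` list and the popped-from token list threaded explicitly;
-- `for _ in range(n)` is the fold `repB` over range(n); same fuel guard as A's port.
mutual
def collectB : Nat → List String → List String → List String × List String
  | _, out, [] => (out, [])
  | 0, out, t => (out, t)
  | f + 1, out, token :: rest =>
    if token = "{" then braceB f (out ++ [token]) rest
    else repB f (PySem.List.pyRange 0 (PySem.Dict.getD ARITY token 0) 1) (out ++ [token]) rest

def repB : Nat → List Int → List String → List String → List String × List String
  | _, [], out, t => (out, t)
  | f, _ :: l, out, t =>
    let p := collectB f out t
    repB f l p.1 p.2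

def braceB : Nat → List String → List String → List String × List String
  | _, out, [] => (out, [])
  | 0, out, t => (out, t)
  | f + 1, out, h :: t =>
    if h = "}" then (out ++ [h], t)
    else
      let p := collectB f out (h :: t)
      braceB f p.1 p.2
end

def collect_expression_alt (tokens : List String) : List String :=
  (collectB (2 * tokens.length + 2) [] tokens).1

-- ===== PRECONDITION & SPEC =====
def Spec_collect_expression (tokens : List String) (out : List String) : Prop := out = collect_expression_alt tokens
instance (tokens : List String) (out : List String) : Decidable (Spec_collect_expression tokens out) := by unfold Spec_collect_expression; infer_instance

-- ===== CLAIM (what is proved, stated in full; the proofs are below) =====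
def Claim_equal_collect_expression : Prop := ∀ (tokens : List String), Dom_collect_expression tokens → Spec_collect_expression tokens (collect_expression tokens)

-- ===== LEMMAS AND PROOFS =====

theorem main_equiv (f : Nat) :
    (∀ t out, collectB f out t = (out ++ (collectA f t).1, (collectA f t).2)) ∧
    (∀ t out, braceB f out t = (out ++ (braceA f t).1, (braceA f t).2)) := by
  induction f with
  | zero =>
    refine ⟨?_, ?_⟩ <;> intro t out <;> cases t <;> simp [collectA, collectB, braceA, braceB]
  | succ f ih =>
    obtain ⟨hc, hb⟩ := ih
    refine ⟨?_, ?_⟩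
    · intro t out
      cases t with
      | nil => simp [collectA, collectB]
      | cons token rest =>
        by_cases h0 : token = "{"
        · subst h0
          simp only [collectA, collectB, hb]
          simp [show pyFloatOk "{" = false from by decide, kwConst, kwBin, kwFun1, kwAsg, kwFdef, kwFap]
        by_cases h1 : token = "pi"
        · subst h1
          simp only [collectB, repB, show PySem.Dict.getD ARITY "pi" 0 = 0 from by decide,
            show PySem.List.pyRange 0 0 1 = ([] : List Int) from by decide, hc, if_neg h0]
          simp only [collectA]
          simp [show pyFloatOk "pi" = false from by decide, kwConst, kwBin, kwFun1, kwAsg, kwFdef, kwFap]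
        by_cases h2 : token = "exit"
        · subst h2
          simp only [collectB, repB, show PySem.Dict.getD ARITY "exit" 0 = 0 from by decide,
            show PySem.List.pyRange 0 0 1 = ([] : List Int) from by decide, hc, if_neg h0]
          simp only [collectA]
          simp [show pyFloatOk "exit" = false from by decide, kwConst, kwBin, kwFun1, kwAsg, kwFdef, kwFap]
        by_cases h3 : token = "a"
        · subst h3
          simp only [collectB, repB, show PySem.Dict.getD ARITY "a" 0 = 0 from by decide,
            show PySem.List.pyRange 0 0 1 = ([] : List Int) from by decide, hc, if_neg h0]
          simp only [collectA]
          simp [show pyFloatOk "a" = false from by decide, kwConst, kwBin, kwFun1, kwAsg, kwFdef, kwFap]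
        by_cases h4 : token = "b"
        · subst h4
          simp only [collectB, repB, show PySem.Dict.getD ARITY "b" 0 = 0 from by decide,
            show PySem.List.pyRange 0 0 1 = ([] : List Int) from by decide, hc, if_neg h0]
          simp only [collectA]
          simp [show pyFloatOk "b" = false from by decide, kwConst, kwBin, kwFun1, kwAsg, kwFdef, kwFap]
        by_cases h5 : token = "c"
        · subst h5
          simp only [collectB, repB, show PySem.Dict.getD ARITY "c" 0 = 0 from by decide,
            show PySem.List.pyRange 0 0 1 = ([] : List Int) from by decide, hc, if_neg h0]
          simp only [collectA]
          simp [show pyFloatOk "c" = false from by decide, kwConst, kwBin, kwFun1, kwAsg, kwFdef, kwFap]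
        by_cases h6 : token = "x"
        · subst h6
          simp only [collectB, repB, show PySem.Dict.getD ARITY "x" 0 = 0 from by decide,
            show PySem.List.pyRange 0 0 1 = ([] : List Int) from by decide, hc, if_neg h0]
          simp only [collectA]
          simp [show pyFloatOk "x" = false from by decide, kwConst, kwBin, kwFun1, kwAsg, kwFdef, kwFap]
        by_cases h7 : token = "+"
        · subst h7
          simp only [collectB, repB, show PySem.Dict.getD ARITY "+" 0 = 2 from by decide,
            show PySem.List.pyRange 0 2 1 = ([0, 1] : List Int) from by decide, hc, if_neg h0]
          simp only [collectA]
          simp [show pyFloatOk "+" = false from by decide, kwConst, kwBin, kwFun1, kwAsg, kwFdef, kwFap]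
        by_cases h8 : token = "-"
        · subst h8
          simp only [collectB, repB, show PySem.Dict.getD ARITY "-" 0 = 2 from by decide,
            show PySem.List.pyRange 0 2 1 = ([0, 1] : List Int) from by decide, hc, if_neg h0]
          simp only [collectA]
          simp [show pyFloatOk "-" = false from by decide, kwConst, kwBin, kwFun1, kwAsg, kwFdef, kwFap]
        by_cases h9 : token = "*"
        · subst h9
          simp only [collectB, repB, show PySem.Dict.getD ARITY "*" 0 = 2 from by decide,
            show PySem.List.pyRange 0 2 1 = ([0, 1] : List Int) from by decide, hc, if_neg h0]
          simp only [collectA]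
          simp [show pyFloatOk "*" = false from by decide, kwConst, kwBin, kwFun1, kwAsg, kwFdef, kwFap]
        by_cases h10 : token = "/"
        · subst h10
          simp only [collectB, repB, show PySem.Dict.getD ARITY "/" 0 = 2 from by decide,
            show PySem.List.pyRange 0 2 1 = ([0, 1] : List Int) from by decide, hc, if_neg h0]
          simp only [collectA]
          simp [show pyFloatOk "/" = false from by decide, kwConst, kwBin, kwFun1, kwAsg, kwFdef, kwFap]
        by_cases h11 : token = "^"
        · subst h11
          simp only [collectB, repB, show PySem.Dict.getD ARITY "^" 0 = 2 from by decide,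
            show PySem.List.pyRange 0 2 1 = ([0, 1] : List Int) from by decide, hc, if_neg h0]
          simp only [collectA]
          simp [show pyFloatOk "^" = false from by decide, kwConst, kwBin, kwFun1, kwAsg, kwFdef, kwFap]
        by_cases h12 : token = "=="
        · subst h12
          simp only [collectB, repB, show PySem.Dict.getD ARITY "==" 0 = 2 from by decide,
            show PySem.List.pyRange 0 2 1 = ([0, 1] : List Int) from by decide, hc, if_neg h0]
          simp only [collectA]
          simp [show pyFloatOk "==" = false from by decide, kwConst, kwBin, kwFun1, kwAsg, kwFdef, kwFap]
        by_cases h13 : token = "<"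
        · subst h13
          simp only [collectB, repB, show PySem.Dict.getD ARITY "<" 0 = 2 from by decide,
            show PySem.List.pyRange 0 2 1 = ([0, 1] : List Int) from by decide, hc, if_neg h0]
          simp only [collectA]
          simp [show pyFloatOk "<" = false from by decide, kwConst, kwBin, kwFun1, kwAsg, kwFdef, kwFap]
        by_cases h14 : token = "sin"
        · subst h14
          simp only [collectB, repB, show PySem.Dict.getD ARITY "sin" 0 = 1 from by decide,
            show PySem.List.pyRange 0 1 1 = ([0] : List Int) from by decide, hc, if_neg h0]
          simp only [collectA]
          simp [show pyFloatOk "sin" = false from by decide, kwConst, kwBin, kwFun1, kwAsg, kwFdef, kwFap]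
        by_cases h15 : token = "cos"
        · subst h15
          simp only [collectB, repB, show PySem.Dict.getD ARITY "cos" 0 = 1 from by decide,
            show PySem.List.pyRange 0 1 1 = ([0] : List Int) from by decide, hc, if_neg h0]
          simp only [collectA]
          simp [show pyFloatOk "cos" = false from by decide, kwConst, kwBin, kwFun1, kwAsg, kwFdef, kwFap]
        by_cases h16 : token = "exp"
        · subst h16
          simp only [collectB, repB, show PySem.Dict.getD ARITY "exp" 0 = 1 from by decide,
            show PySem.List.pyRange 0 1 1 = ([0] : List Int) from by decide, hc, if_neg h0]
          simp only [collectA]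
          simp [show pyFloatOk "exp" = false from by decide, kwConst, kwBin, kwFun1, kwAsg, kwFdef, kwFap]
        by_cases h17 : token = "log"
        · subst h17
          simp only [collectB, repB, show PySem.Dict.getD ARITY "log" 0 = 1 from by decide,
            show PySem.List.pyRange 0 1 1 = ([0] : List Int) from by decide, hc, if_neg h0]
          simp only [collectA]
          simp [show pyFloatOk "log" = false from by decide, kwConst, kwBin, kwFun1, kwAsg, kwFdef, kwFap]
        by_cases h18 : token = "sqrt"
        · subst h18
          simp only [collectB, repB, show PySem.Dict.getD ARITY "sqrt" 0 = 1 from by decide,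
            show PySem.List.pyRange 0 1 1 = ([0] : List Int) from by decide, hc, if_neg h0]
          simp only [collectA]
          simp [show pyFloatOk "sqrt" = false from by decide, kwConst, kwBin, kwFun1, kwAsg, kwFdef, kwFap]
        by_cases h19 : token = "a="
        · subst h19
          simp only [collectB, repB, show PySem.Dict.getD ARITY "a=" 0 = 1 from by decide,
            show PySem.List.pyRange 0 1 1 = ([0] : List Int) from by decide, hc, if_neg h0]
          simp only [collectA]
          simp [show pyFloatOk "a=" = false from by decide, kwConst, kwBin, kwFun1, kwAsg, kwFdef, kwFap]
        by_cases h20 : token = "b="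
        · subst h20
          simp only [collectB, repB, show PySem.Dict.getD ARITY "b=" 0 = 1 from by decide,
            show PySem.List.pyRange 0 1 1 = ([0] : List Int) from by decide, hc, if_neg h0]
          simp only [collectA]
          simp [show pyFloatOk "b=" = false from by decide, kwConst, kwBin, kwFun1, kwAsg, kwFdef, kwFap]
        by_cases h21 : token = "c="
        · subst h21
          simp only [collectB, repB, show PySem.Dict.getD ARITY "c=" 0 = 1 from by decide,
            show PySem.List.pyRange 0 1 1 = ([0] : List Int) from by decide, hc, if_neg h0]
          simp only [collectA]
          simp [show pyFloatOk "c=" = false from by decide, kwConst, kwBin, kwFun1, kwAsg, kwFdef, kwFap]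
        by_cases h22 : token = "f="
        · subst h22
          simp only [collectB, repB, show PySem.Dict.getD ARITY "f=" 0 = 1 from by decide,
            show PySem.List.pyRange 0 1 1 = ([0] : List Int) from by decide, hc, if_neg h0]
          simp only [collectA]
          simp [show pyFloatOk "f=" = false from by decide, kwConst, kwBin, kwFun1, kwAsg, kwFdef, kwFap]
        by_cases h23 : token = "g="
        · subst h23
          simp only [collectB, repB, show PySem.Dict.getD ARITY "g=" 0 = 1 from by decide,
            show PySem.List.pyRange 0 1 1 = ([0] : List Int) from by decide, hc, if_neg h0]
          simp only [collectA]
          simp [show pyFloatOk "g=" = false from by decide, kwConst, kwBin, kwFun1, kwAsg, kwFdef, kwFap]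
        by_cases h24 : token = "f"
        · subst h24
          simp only [collectB, repB, show PySem.Dict.getD ARITY "f" 0 = 1 from by decide,
            show PySem.List.pyRange 0 1 1 = ([0] : List Int) from by decide, hc, if_neg h0]
          simp only [collectA]
          simp [show pyFloatOk "f" = false from by decide, kwConst, kwBin, kwFun1, kwAsg, kwFdef, kwFap]
        by_cases h25 : token = "g"
        · subst h25
          simp only [collectB, repB, show PySem.Dict.getD ARITY "g" 0 = 1 from by decide,
            show PySem.List.pyRange 0 1 1 = ([0] : List Int) from by decide, hc, if_neg h0]
          simp only [collectA]
          simp [show pyFloatOk "g" = false from by decide, kwConst, kwBin, kwFun1, kwAsg, kwFdef, kwFap]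
        by_cases h26 : token = "if"
        · subst h26
          simp only [collectB, repB, show PySem.Dict.getD ARITY "if" 0 = 3 from by decide,
            show PySem.List.pyRange 0 3 1 = ([0, 1, 2] : List Int) from by decide, hc, if_neg h0]
          simp only [collectA]
          simp [show pyFloatOk "if" = false from by decide, kwConst, kwBin, kwFun1, kwAsg, kwFdef, kwFap]
        -- token is none of the keywords: a leaf on both sides, whether float-parsable or not
        have hA : ARITY = PySem.Dict.mk [("+", 2), ("-", 2), ("*", 2), ("/", 2), ("^", 2),
            ("==", 2), ("<", 2), ("sin", 1), ("cos", 1), ("exp", 1), ("log", 1), ("sqrt", 1),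
            ("a=", 1), ("b=", 1), ("c=", 1), ("f=", 1), ("g=", 1), ("f", 1), ("g", 1),
            ("if", 3)] := by decide
        have hget : PySem.Dict.getD ARITY token 0 = 0 := by
          simp [hA, PySem.Dict.getD, PySem.Dict.get?_mk_cons, PySem.Dict.get?,
            Ne.symm h1, Ne.symm h2, Ne.symm h3, Ne.symm h4, Ne.symm h5, Ne.symm h6, Ne.symm h7, Ne.symm h8, Ne.symm h9, Ne.symm h10, Ne.symm h11, Ne.symm h12, Ne.symm h13, Ne.symm h14, Ne.symm h15, Ne.symm h16, Ne.symm h17, Ne.symm h18, Ne.symm h19, Ne.symm h20, Ne.symm h21, Ne.symm h22, Ne.symm h23, Ne.symm h24, Ne.symm h25, Ne.symm h26]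
        simp only [collectB, repB, hget, show PySem.List.pyRange 0 0 1 = ([] : List Int) from by decide, if_neg h0]
        by_cases hf : pyFloatOk token = true <;>
          simp [collectA, hf, kwConst, kwBin, kwFun1, kwAsg, kwFdef, kwFap, h0, h1, h2, h3, h4, h5, h6, h7, h8, h9, h10, h11, h12, h13, h14, h15, h16, h17, h18, h19, h20, h21, h22, h23, h24, h25, h26]
    · intro t out
      cases t with
      | nil => simp [braceA, braceB]
      | cons h t =>
        by_cases hh : h = "}"
        · subst hh; simp [braceA, braceB]
        · simp only [braceA, braceB, if_neg hh, hc, hb]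
          simp

-- ===== VERDICT (by name: the statement is the Claim_ definition above) =====
theorem collect_expression_spec : Claim_equal_collect_expression := by
  intro tokens _
  unfold Spec_collect_expression collect_expression collect_expression_alt
  rw [(main_equiv _).1]
  simp
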